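-- pv_equiv track=rewrite | github.com/Avereniect/AVEL | run_avel_benchmarks.py | remove_type_suffix
-- ===== SOURCE A (Python) =====
-- def remove_type_suffix(name: str):
--     suffixes = [
--         '_8u',
--         '_16u',
--         '_32u',
--         '_64u',
--         '_8i',
--         '_16i',
--         '_32i',
--         '_64i',
--         '_16f',
--         '_32f',
--         '_64f'
--     ]
--
--     for suffix in suffixes:
--         if name.endswith(suffix):
--             return tuple([name.removesuffix(suffix), suffix])
--
--     return tuple([name, None])
-- ===== SOURCE B (Python) =====
-- _SUFFIXES = frozenset([
--     '_8u', '_16u', '_32u', '_64u',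
--     '_8i', '_16i', '_32i', '_64i',
--     '_16f', '_32f', '_64f',
-- ])
--
--
-- def remove_type_suffix(name: str):
--     idx = name.rfind('_')
--     if idx != -1:
--         tail = name[idx:]
--         if tail in _SUFFIXES:
--             return (name[:idx], tail)
--     return (name, None)
-- ===== Notes on version B (the rewrite author's own statement) =====
-- stated objective: idiomatic
-- what changed: B replaces A's sequential loop of eleven endswith checks by one rfind locating the last underscore and a single frozenset membership test of the tail, reconstructing the (stripped name, suffix) pair from the split point.
import Mathlib
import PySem

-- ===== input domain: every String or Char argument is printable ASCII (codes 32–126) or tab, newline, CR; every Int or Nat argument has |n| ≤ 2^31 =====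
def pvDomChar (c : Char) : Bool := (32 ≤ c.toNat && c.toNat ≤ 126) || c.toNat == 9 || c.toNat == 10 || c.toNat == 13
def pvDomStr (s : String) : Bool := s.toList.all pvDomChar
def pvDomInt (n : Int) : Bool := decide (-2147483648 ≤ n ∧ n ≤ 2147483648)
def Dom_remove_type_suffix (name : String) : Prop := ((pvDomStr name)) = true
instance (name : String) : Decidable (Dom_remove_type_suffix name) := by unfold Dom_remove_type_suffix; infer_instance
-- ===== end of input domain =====

-- B replaces A's eleven endswith scans by one rfind('_') plus a single frozenset membership test (idiomatic; same exact results).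

-- ===== PORT A =====
def pvSuffixesA : List String :=
  ["_8u", "_16u", "_32u", "_64u", "_8i", "_16i", "_32i", "_64i", "_16f", "_32f", "_64f"]

-- str.removesuffix, exact: drop the suffix iff the string ends with it (empty suffix drops nothing)
def pvRemovesuffix (s suf : String) : String :=
  if PySem.Str.endswith s suf then String.ofList (s.toList.take (s.toList.length - suf.toList.length)) else s

-- the for-loop with early return
def pvLoopA (name : String) : List String → String × Option String
  | [] => (name, none)
  | suf :: rest =>
      if PySem.Str.endswith name suf then (pvRemovesuffix name suf, some suf)
      else pvLoopA name rest

def remove_type_suffix (name : String) : String × Option String :=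
  pvLoopA name pvSuffixesA

-- ===== PORT B =====
def pvSuffixSet : PySem.Set String :=
  PySem.Set.ofList ["_8u", "_16u", "_32u", "_64u", "_8i", "_16i", "_32i", "_64i", "_16f", "_32f", "_64f"]

-- hand port of str.rfind for a one-character needle, exact: index of the last occurrence, -1 if absent
def pvRfindChar (s : String) (c : Char) : Int :=
  match s.toList.reverse.findIdx? (· == c) with
  | some j => (s.toList.length : Int) - 1 - (j : Int)
  | none => -1

def remove_type_suffix_alt (name : String) : String × Option String :=
  let idx := pvRfindChar name '_'
  if idx = -1 then (name, none)
  else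
    -- name[idx:] and name[:idx] with 0 ≤ idx < len name: plain drop/take (exact here)
    let tail := String.ofList (name.toList.drop idx.toNat)
    if tail ∈ pvSuffixSet then (String.ofList (name.toList.take idx.toNat), some tail)
    else (name, none)

-- ===== PRECONDITION & SPEC =====
def Spec_remove_type_suffix (name : String) (out : String × Option String) : Prop := out = remove_type_suffix_alt name
instance (name : String) (out : String × Option String) : Decidable (Spec_remove_type_suffix name out) := by unfold Spec_remove_type_suffix; infer_instance

-- ===== CLAIM (what is proved, stated in full; the proofs are below) =====
def Claim_equal_remove_type_suffix : Prop := ∀ (name : String), Dom_remove_type_suffix name → Spec_remove_type_suffix name (remove_type_suffix name)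

-- ===== LEMMAS AND PROOFS =====

-- every listed suffix is '_' followed by an underscore-free tail
lemma pvShape : ∀ s ∈ pvSuffixesA, s.toList.head? = some '_' ∧ '_' ∉ s.toList.tail := by decide

-- no listed suffix is a proper suffix of another
lemma pvUnique : ∀ a ∈ pvSuffixesA, ∀ b ∈ pvSuffixesA, a.toList <:+ b.toList → a = b := by decide

lemma pvSetEq : pvSuffixSet = pvSuffixesA := by decide

lemma pvLoopA_none (name : String) (l : List String)
    (h : ∀ s ∈ l, PySem.Str.endswith name s = false) : pvLoopA name l = (name, none) := by
  induction l with
  | nil => rfl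
  | cons x xs ih =>
      simp only [pvLoopA, h x (by simp)]
      exact ih fun s hs => h s (by simp [hs])

lemma pvLoopA_match (name suf : String) (l : List String)
    (hmem : suf ∈ l) (hend : PySem.Str.endswith name suf = true)
    (huniq : ∀ s ∈ l, PySem.Str.endswith name s = true → s = suf) :
    pvLoopA name l = (pvRemovesuffix name suf, some suf) := by
  induction l with
  | nil => simp at hmem
  | cons x xs ih =>
      by_cases hx : PySem.Str.endswith name x = true
      · have : x = suf := huniq x (by simp) hx
        subst this
        simp only [pvLoopA]
        rw [if_pos hx]
      · simp only [pvLoopA]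
        rw [if_neg hx]
        rcases List.mem_cons.mp hmem with h | h
        · exact absurd (h ▸ hend) hx
        · exact ih h fun s hs he => huniq s (by simp [hs]) he

theorem pv_main (name : String) : remove_type_suffix name = remove_type_suffix_alt name := by
  by_cases hm : ∃ suf ∈ pvSuffixesA, PySem.Str.endswith name suf = true
  · obtain ⟨suf, hmem, hend⟩ := hm
    -- shape of the matching suffix
    obtain ⟨hhd, hnot⟩ := pvShape suf hmem
    obtain ⟨pre, hpre⟩ : suf.toList <:+ name.toList := by
      have := PySem.Str.endswith_eq name suf
      rw [this] at hend
      exact (PySem.Chars.endswith_iff _ _).mp hend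
    obtain ⟨c, body, hsl⟩ : ∃ c body, suf.toList = c :: body := by
      cases h : suf.toList with
      | nil => rw [h] at hhd; simp at hhd
      | cons c body => exact ⟨c, body, rfl⟩
    have hc : c = '_' := by rw [hsl] at hhd; simpa using hhd
    subst hc
    have hbody : '_' ∉ body := by rw [hsl] at hnot; simpa using hnot
    -- the reversed string and rfind
    have hrev : name.toList.reverse = (body.reverse ++ ['_']) ++ pre.reverse := by
      rw [← hpre, hsl]; simp
    have hfind : name.toList.reverse.findIdx? (· == '_') = some body.length := by
      rw [hrev, List.findIdx?_append, List.findIdx?_append]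
      have h1 : body.reverse.findIdx? (· == '_') = none := by
        rw [List.findIdx?_eq_none_iff]
        intro x hx
        simp only [beq_eq_false_iff_ne, ne_eq]
        rintro rfl
        exact hbody (List.mem_reverse.mp hx)
      rw [h1]
      simp [List.findIdx?_cons]
    have hlen : name.toList.length = pre.length + (body.length + 1) := by
      rw [← hpre, hsl]; simp
    have hidx : pvRfindChar name '_' = (pre.length : Int) := by
      unfold pvRfindChar
      rw [hfind]
      simp only [hlen]
      push_cast
      omega
    -- B's branch
    have htailL : name.toList.drop ((pvRfindChar name '_').toNat) = suf.toList := by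
      rw [hidx]
      simp only [Int.toNat_natCast]
      rw [← hpre]
      exact List.drop_left
    have htail : String.ofList (name.toList.drop ((pvRfindChar name '_').toNat)) = suf := by
      rw [htailL]; simp
    have hA : remove_type_suffix name = (pvRemovesuffix name suf, some suf) := by
      unfold remove_type_suffix
      refine pvLoopA_match name suf _ hmem hend ?_
      intro s hs he
      have hs1 : s.toList <:+ name.toList := by
        have := PySem.Str.endswith_eq name s
        rw [this] at he
        exact (PySem.Chars.endswith_iff _ _).mp he
      rcases List.suffix_or_suffix_of_suffix hs1 ⟨pre, hpre⟩ with h | h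
      · exact pvUnique s hs suf hmem h
      · exact (pvUnique suf hmem s hs h).symm
    rw [hA]
    unfold remove_type_suffix_alt
    rw [hidx] at htail ⊢
    rw [if_neg (by omega)]
    rw [htail]
    rw [if_pos (by rw [pvSetEq]; exact hmem)]
    have hfst : pvRemovesuffix name suf
        = String.ofList (name.toList.take ((pre.length : Int)).toNat) := by
      unfold pvRemovesuffix
      rw [if_pos hend]
      congr 1
      congr 1
      have hsuflen : suf.toList.length = body.length + 1 := by rw [hsl]; rfl
      simp only [Int.toNat_natCast]
      omega
    rw [hfst]
  · push Not at hm
    have hm' : ∀ s ∈ pvSuffixesA, PySem.Str.endswith name s = false :=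
      fun s hs => Bool.not_eq_true _ ▸ (hm s hs)
    have hA : remove_type_suffix name = (name, none) := pvLoopA_none name _ hm'
    rw [hA]
    unfold remove_type_suffix_alt
    by_cases hidx : pvRfindChar name '_' = -1
    · rw [if_pos hidx]
    · rw [if_neg hidx]
      rw [if_neg ?_]
      intro hmemS
      rw [pvSetEq] at hmemS
      have hsfx : (String.ofList (name.toList.drop ((pvRfindChar name '_').toNat))).toList <:+ name.toList := by
        simp only [String.toList_ofList]
        exact List.drop_suffix _ _
      have : PySem.Str.endswith name (String.ofList (name.toList.drop ((pvRfindChar name '_').toNat))) = true := by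
        rw [PySem.Str.endswith_eq]
        exact (PySem.Chars.endswith_iff _ _).mpr hsfx
      have hf : PySem.Str.endswith name
          (String.ofList (name.toList.drop ((pvRfindChar name '_').toNat))) = false := hm' _ hmemS
      rw [hf] at this
      exact Bool.false_ne_true this

-- ===== VERDICT (by name: the statement is the Claim_ definition above) =====
theorem remove_type_suffix_spec : Claim_equal_remove_type_suffix := by
  intro name _
  exact pv_main name
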